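-- pv_equiv track=rewrite | github.com/wjl57/SudokuSolver | SudokuBoard.py | rotate_board_cw
-- ===== SOURCE A (Python) =====
-- def rotate_board_cw(board, n=1):
--     def rotate_cw(board):
--         rotated_board = [[None for _ in range(0, 9)] for _ in range(0, 9)]
--         for y in range(0, 9):
--             for x in range(0, 9):
--                 rotated_board[y][x] = board[8-x][y]
--         return rotated_board
--
--     for _ in range(0, n % 4):
--         board = rotate_cw(board)
--     return board
-- ===== SOURCE B (Python) =====
-- def rotate_board_cw(board, n=1):
--     r = n % 4
--     if r == 0:
--         return board
--     if r == 1: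
--         return [[board[8 - x][y] for x in range(9)] for y in range(9)]
--     if r == 2:
--         return [[board[8 - y][8 - x] for x in range(9)] for y in range(9)]
--     return [[board[x][8 - y] for x in range(9)] for y in range(9)]
-- ===== Notes on version B (the rewrite author's own statement) =====
-- stated objective: simpler
-- what changed: Instead of rebuilding the grid once per rotation (up to three successive rebuild passes), B computes r = n % 4 and builds the result in one pass, mapping each (y,x) directly to the source cell of the r-fold composed clockwise rotation (r==1: board[8-x][y], r==2: board[8-y][8-x], r==3: board[x][8-y]); r==0 returns the board unchanged.
import Mathlib
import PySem

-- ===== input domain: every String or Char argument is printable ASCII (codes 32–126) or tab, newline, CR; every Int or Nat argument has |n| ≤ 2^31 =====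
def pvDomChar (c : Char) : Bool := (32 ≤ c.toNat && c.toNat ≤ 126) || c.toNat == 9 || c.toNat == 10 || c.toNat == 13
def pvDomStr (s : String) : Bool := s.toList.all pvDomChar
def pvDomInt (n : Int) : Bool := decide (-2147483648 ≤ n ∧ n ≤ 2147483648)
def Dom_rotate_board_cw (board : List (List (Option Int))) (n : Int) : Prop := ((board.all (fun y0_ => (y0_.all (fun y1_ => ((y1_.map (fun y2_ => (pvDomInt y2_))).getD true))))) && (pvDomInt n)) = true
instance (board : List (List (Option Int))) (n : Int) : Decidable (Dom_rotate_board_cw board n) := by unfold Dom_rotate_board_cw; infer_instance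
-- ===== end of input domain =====

-- B replaces A's up-to-three successive grid rebuilds by one direct index-mapping pass
-- for r = n % 4 (identical return value; when r = 0 both return the board unchanged).

-- ===== PORT A =====
-- board[8-x][y] (both indices are in 0..8, so no negative-index behaviour is reachable);
-- out-of-range access is an IndexError in Python, excluded by Pre_ below.
def pvCellA (b : List (List (Option Int))) (i j : Int) : Option Int :=
  (((PySem.List.pyGet? b i).bind (fun row => PySem.List.pyGet? row j)).join)

-- the inner helper rotate_cw: fills a fresh 9x9 grid with rotated[y][x] = board[8-x][y]
def pvRotateCwA (b : List (List (Option Int))) : List (List (Option Int)) :=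
  (PySem.List.pyRange 0 9 1).map (fun y =>
    (PySem.List.pyRange 0 9 1).map (fun x => pvCellA b (8 - x) y))

-- for _ in range(0, n % 4): board = rotate_cw(board)
def rotate_board_cw (board : List (List (Option Int))) (n : Int) : List (List (Option Int)) :=
  (PySem.List.pyRange 0 (PySem.Int.mod n 4) 1).foldl (fun b _ => pvRotateCwA b) board

-- ===== PORT B =====
def pvCellB (b : List (List (Option Int))) (i j : Int) : Option Int :=
  (((PySem.List.pyGet? b i).bind (fun row => PySem.List.pyGet? row j)).join)

def rotate_board_cw_alt (board : List (List (Option Int))) (n : Int) : List (List (Option Int)) :=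
  let r := PySem.Int.mod n 4
  if r = 0 then board
  else if r = 1 then
    (PySem.List.pyRange 0 9 1).map (fun y =>
      (PySem.List.pyRange 0 9 1).map (fun x => pvCellB board (8 - x) y))
  else if r = 2 then
    (PySem.List.pyRange 0 9 1).map (fun y =>
      (PySem.List.pyRange 0 9 1).map (fun x => pvCellB board (8 - y) (8 - x)))
  else
    (PySem.List.pyRange 0 9 1).map (fun y =>
      (PySem.List.pyRange 0 9 1).map (fun x => pvCellB board x (8 - y)))

-- ===== PRECONDITION & SPEC =====
-- Exactly the inputs on which Python A returns without an IndexError: either no rotation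
-- happens (n % 4 == 0) or the first nine rows exist and each has at least nine cells.
def Pre_rotate_board_cw (board : List (List (Option Int))) (n : Int) : Prop :=
  PySem.Int.mod n 4 = 0 ∨ (9 ≤ board.length ∧ ∀ row ∈ board.take 9, 9 ≤ row.length)
instance (board : List (List (Option Int))) (n : Int) : Decidable (Pre_rotate_board_cw board n) := by unfold Pre_rotate_board_cw; infer_instance

def pvWitness_rotate_board_cw : List (List (Option Int)) × Int :=
  (List.replicate 9 (List.replicate 9 (some 5)), 1)

def Spec_rotate_board_cw (board : List (List (Option Int))) (n : Int) (out : List (List (Option Int))) : Prop := out = rotate_board_cw_alt board n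
instance (board : List (List (Option Int))) (n : Int) (out : List (List (Option Int))) : Decidable (Spec_rotate_board_cw board n out) := by unfold Spec_rotate_board_cw; infer_instance

-- ===== CLAIM (what is proved, stated in full; the proofs are below) =====
def Claim_equal_rotate_board_cw : Prop := ∀ (board : List (List (Option Int))) (n : Int), Dom_rotate_board_cw board n → Pre_rotate_board_cw board n → Spec_rotate_board_cw board n (rotate_board_cw board n)

-- ===== LEMMAS AND PROOFS =====

theorem pvRange9 : PySem.List.pyRange 0 9 1 = [0, 1, 2, 3, 4, 5, 6, 7, 8] := by decide

-- Rotating twice reads board[8-y][8-x]; rotating three times reads board[x][8-y].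
-- These hold for EVERY board because pvRotateCwA always returns a literal 9x9 grid,
-- so the outer lookups of the second/third rotation always succeed.
theorem pvRotate2 (b : List (List (Option Int))) :
    pvRotateCwA (pvRotateCwA b)
      = (PySem.List.pyRange 0 9 1).map (fun y =>
          (PySem.List.pyRange 0 9 1).map (fun x => pvCellA b (8 - y) (8 - x))) := by
  simp only [pvRotateCwA, pvRange9]
  rfl

theorem pvRotate3 (b : List (List (Option Int))) :
    pvRotateCwA (pvRotateCwA (pvRotateCwA b))
      = (PySem.List.pyRange 0 9 1).map (fun y =>
          (PySem.List.pyRange 0 9 1).map (fun x => pvCellA b x (8 - y))) := by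
  simp only [pvRotateCwA, pvRange9]
  rfl

-- ===== VERDICT (by name: the statement is the Claim_ definition above) =====
theorem rotate_board_cw_spec : Claim_equal_rotate_board_cw := by
  intro board n _ _
  unfold Spec_rotate_board_cw rotate_board_cw rotate_board_cw_alt
  have h4 : (0:Int) < 4 := by norm_num
  have hlo : 0 ≤ PySem.Int.mod n 4 := PySem.Int.mod_nonneg n h4
  have hhi : PySem.Int.mod n 4 < 4 := PySem.Int.mod_lt n h4
  set r := PySem.Int.mod n 4 with hr
  interval_cases r
  · simp [PySem.List.pyRange]
  · rw [show PySem.List.pyRange 0 1 1 = [0] from by decide]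
    simp only [List.foldl]
    norm_num [pvRotateCwA, pvCellA, pvCellB]
  · rw [show PySem.List.pyRange 0 2 1 = [0, 1] from by decide]
    simp only [List.foldl]
    rw [pvRotate2]
    norm_num [pvCellA, pvCellB]
  · rw [show PySem.List.pyRange 0 3 1 = [0, 1, 2] from by decide]
    simp only [List.foldl]
    rw [pvRotate3]
    norm_num [pvCellA, pvCellB]
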